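-- pv_equiv track=rewrite | github.com/stormrider94/codewars_attempt | alternate_square_sum.py | alternate_sq_sum
-- ===== SOURCE A (Python) =====
-- def alternate_sq_sum(arr):
--     total = 0
--     for i,val in enumerate(arr):
--         i = i+1
--         if i%2 == 0:
--             total += val**2
--         else:
--             total += val
--     return total
-- ===== SOURCE B (Python) =====
-- def alternate_sq_sum(arr):
--     return sum(arr[0::2]) + sum(v * v for v in arr[1::2])
-- ===== Notes on version B (the rewrite author's own statement) =====
-- stated objective: alternative
-- what changed: Replaces the single enumerate loop with a per-element parity branch by two homogeneous passes over the index-parity slices: plain sum of arr[0::2] plus sum of squares of arr[1::2].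
import Mathlib
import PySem

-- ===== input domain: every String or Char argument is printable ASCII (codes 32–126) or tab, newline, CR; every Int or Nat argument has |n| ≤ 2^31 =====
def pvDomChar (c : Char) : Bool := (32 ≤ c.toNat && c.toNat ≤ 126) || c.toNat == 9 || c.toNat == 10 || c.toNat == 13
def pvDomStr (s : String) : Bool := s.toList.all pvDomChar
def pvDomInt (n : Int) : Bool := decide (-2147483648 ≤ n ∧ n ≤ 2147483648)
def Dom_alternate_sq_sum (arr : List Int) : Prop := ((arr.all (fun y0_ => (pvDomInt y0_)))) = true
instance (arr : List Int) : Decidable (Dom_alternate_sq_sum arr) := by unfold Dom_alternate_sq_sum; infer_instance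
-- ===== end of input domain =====

-- B replaces the per-element parity branch by two homogeneous passes over the
-- index-parity slices (sum of arr[0::2] plus sum of squares of arr[1::2]); same cost.

-- ===== PORT A =====
-- for i,val in enumerate(arr): i = i+1; if i%2==0: total += val**2 else: total += val
def alternate_sq_sum (arr : List Int) : Int :=
  (PySem.List.enumerate arr 0).foldl
    (fun total p =>
      let i := p.1 + 1
      if PySem.Int.mod i 2 = 0 then total + p.2 ^ 2 else total + p.2)
    0

-- ===== PORT B =====
-- hand port of the strided slice xs[::2] (every second element), exact for step 2
def pvStride2 : List Int → List Int
  | [] => []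
  | [x] => [x]
  | x :: _ :: rest => x :: pvStride2 rest

-- sum(arr[0::2]) + sum(v*v for v in arr[1::2])  (arr[1::2] = stride2 of arr dropped by 1)
def alternate_sq_sum_alt (arr : List Int) : Int :=
  (pvStride2 arr).sum + ((pvStride2 (arr.drop 1)).map (fun v => v * v)).sum

-- ===== PRECONDITION & SPEC =====
def Spec_alternate_sq_sum (arr : List Int) (out : Int) : Prop := out = alternate_sq_sum_alt arr
instance (arr : List Int) (out : Int) : Decidable (Spec_alternate_sq_sum arr out) := by unfold Spec_alternate_sq_sum; infer_instance

-- ===== CLAIM (what is proved, stated in full; the proofs are below) =====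
def Claim_equal_alternate_sq_sum : Prop := ∀ (arr : List Int), Dom_alternate_sq_sum arr → Spec_alternate_sq_sum arr (alternate_sq_sum arr)

-- ===== LEMMAS AND PROOFS =====

theorem pvStride2_cons (y : Int) (l : List Int) :
    pvStride2 (y :: l) = y :: pvStride2 l.tail := by
  cases l <;> simp [pvStride2]

-- A's loop over enumerate starting at an even index 2*s accumulates exactly
-- B's two slice sums, two elements at a time.
theorem pv_main : ∀ (arr : List Int) (t : Int) (s : Nat),
    (PySem.List.enumerate arr (2 * (s : Int))).foldl
      (fun total p =>
        let i := p.1 + 1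
        if PySem.Int.mod i 2 = 0 then total + p.2 ^ 2 else total + p.2)
      t
    = t + (pvStride2 arr).sum + ((pvStride2 (arr.drop 1)).map (fun v => v * v)).sum
  | [], t, s => by simp [PySem.List.enumerate, pvStride2]
  | [x], t, s => by
    simp [PySem.List.enumerate_cons, PySem.List.enumerate_nil, pvStride2]
  | x :: y :: rest, t, s => by
    have h1 : PySem.Int.mod (2 * (s : Int) + 1) 2 = 1 := by
      rw [PySem.Int.mod_eq_emod_of_pos (by omega)]; omega
    have h2 : PySem.Int.mod (2 * (s : Int) + 1 + 1) 2 = 0 := by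
      rw [PySem.Int.mod_eq_emod_of_pos (by omega)]; omega
    have hs : 2 * (s : Int) + 1 + 1 = 2 * ((s + 1 : Nat) : Int) := by push_cast; ring
    have ih := pv_main rest (t + x + y ^ 2) (s + 1)
    have h1' : ¬ (PySem.Int.mod (2 * (s : Int) + 1) 2 = 0) := by rw [h1]; decide
    simp only [PySem.List.enumerate_cons, List.foldl_cons]
    rw [if_neg h1', if_pos h2, hs, ih]
    simp [pvStride2_cons, pvStride2]
    ring

-- ===== VERDICT (by name: the statement is the Claim_ definition above) =====
theorem alternate_sq_sum_spec : Claim_equal_alternate_sq_sum := by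
  intro arr _
  unfold Spec_alternate_sq_sum alternate_sq_sum alternate_sq_sum_alt
  have := pv_main arr 0 0
  simpa using this
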